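-- pv_equiv track=rewrite | github.com/chenmike1986/change_pov | mention_selection/train_model_f_m1_dev_conll_gold_test_three.py | get_to_info
-- ===== SOURCE A (Python) =====
-- def get_to_info(sentence_num_to_sentence_text, focus_mention_sentence_num, focus_mention_index_in_sentence, focus_mention):
--     total_token_size = 50
--     post_padding = 0
--     to_sentence = -1
--     to_token = -1
--     focus_mention_parts = focus_mention.split()
--     sorted_sentence_num_list = sorted(sentence_num_to_sentence_text.keys())
--     pre_sentence_len = 0
--     for sentence_num in sorted_sentence_num_list:
--         sentence_text = sentence_num_to_sentence_text[sentence_num]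
--         sentence_text_parts = sentence_text.split()
--         pre_sentence_len = len(sentence_text_parts)
--         if sentence_num < focus_mention_sentence_num:
--             continue
--         elif sentence_num == focus_mention_sentence_num:
--             if focus_mention_index_in_sentence+len(focus_mention_parts) + 50 <= len(sentence_text_parts):
--                 to_token = focus_mention_index_in_sentence+len(focus_mention_parts) + 49
--                 to_sentence = sentence_num
--                 total_token_size = 0
--                 break
--             else:
--                 total_token_size = 50 - (len(sentence_text_parts) - focus_mention_index_in_sentence - len(focus_mention_parts))
--         else:
--             if len(sentence_text_parts) >= total_token_size:
--                 to_sentence = sentence_num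
--                 to_token = total_token_size - 1
--                 total_token_size = 0
--                 break
--             else:
--                 total_token_size = total_token_size - len(sentence_text_parts)
--
--     if total_token_size != 0:
--         to_sentence = sorted_sentence_num_list[len(sorted_sentence_num_list)-1]
--         to_token = pre_sentence_len - 1
--         post_padding = total_token_size
--
--     return to_sentence, to_token, post_padding
-- ===== SOURCE B (Python) =====
-- import bisect
--
--
-- def get_to_info(sentence_num_to_sentence_text, focus_mention_sentence_num, focus_mention_index_in_sentence, focus_mention):
--     d = sentence_num_to_sentence_text
--     keys = sorted(d)
--     lens = [len(d[k].split()) for k in keys]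
--     fml = len(focus_mention.split())
--     # sentences strictly after the focus number start here
--     start = bisect.bisect_right(keys, focus_mention_sentence_num)
--     needed = 50
--     if focus_mention_sentence_num in d:
--         sen_len = len(d[focus_mention_sentence_num].split())
--         if focus_mention_index_in_sentence + fml + 50 <= sen_len:
--             return focus_mention_sentence_num, focus_mention_index_in_sentence + fml + 49, 0
--         needed = 50 - (sen_len - focus_mention_index_in_sentence - fml)
--     # cumulative token counts of the sentences after the focus; the answer is an
--     # arithmetic search on this monotone array instead of a running subtraction
--     prefix = []
--     acc = 0
--     for c in lens[start:]:
--         acc += c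
--         prefix.append(acc)
--     j = bisect.bisect_left(prefix, needed)
--     if j < len(prefix):
--         prev = prefix[j - 1] if j > 0 else 0
--         return keys[start + j], needed - prev - 1, 0
--     total = prefix[-1] if prefix else 0
--     return keys[-1], lens[-1] - 1, needed - total
-- ===== Notes on version B (the rewrite author's own statement) =====
-- stated objective: alternative
-- what changed: B replaces A's single running-budget loop that splits every sentence and subtracts token counts one by one with staged passes: it builds a length table, handles the focus sentence via a dict-membership test and bisect_right, builds a cumulative prefix-sum array of the token counts after the focus, and finds the ending sentence by a binary search (bisect_left) on that monotone array, with the padding fallback read off the last prefix sum.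
-- outside the precondition, e.g. on get_to_info({}, 0, 0, 'x'): A raises IndexError, B raises IndexError
import Mathlib
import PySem

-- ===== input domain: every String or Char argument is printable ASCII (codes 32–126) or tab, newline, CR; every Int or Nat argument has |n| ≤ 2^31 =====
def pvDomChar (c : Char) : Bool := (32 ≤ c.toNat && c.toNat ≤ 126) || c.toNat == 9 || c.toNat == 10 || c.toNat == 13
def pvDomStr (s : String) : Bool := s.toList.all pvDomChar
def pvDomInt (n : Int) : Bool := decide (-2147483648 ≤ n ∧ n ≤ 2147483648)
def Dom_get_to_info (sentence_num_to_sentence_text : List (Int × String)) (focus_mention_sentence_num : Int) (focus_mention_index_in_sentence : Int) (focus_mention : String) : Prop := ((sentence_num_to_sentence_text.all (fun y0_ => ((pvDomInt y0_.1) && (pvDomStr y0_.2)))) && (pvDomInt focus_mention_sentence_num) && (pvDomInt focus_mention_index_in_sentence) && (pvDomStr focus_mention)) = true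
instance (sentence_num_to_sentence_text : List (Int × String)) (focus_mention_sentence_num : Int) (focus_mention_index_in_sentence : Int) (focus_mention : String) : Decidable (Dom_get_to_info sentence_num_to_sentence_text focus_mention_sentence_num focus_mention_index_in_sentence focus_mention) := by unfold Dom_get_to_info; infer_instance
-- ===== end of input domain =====

-- B replaces A's single running-budget loop over every sentence by staged passes: a length table,
-- a cumulative prefix-sum array over the sentences after the focus, and a binary search (bisect)
-- on that monotone array; same return value (objective: alternative).

-- ===== PORT A =====
-- A's for-loop over the sorted sentence numbers; state = (total_token_size, pre_sentence_len,
-- to_sentence, to_token); a 'break' returns immediately (total_token_size is 0 exactly on break).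
def pvALoop (d : PySem.Dict Int String) (fms fmi fml : Int) :
    List Int → Int × Int × Int × Int → Int × Int × Int × Int
  | [], st => st
  | sn :: rest, (tts, _pre, ts, tt) =>
    let parts := PySem.Str.split₀ (PySem.Dict.getD d sn "")
    let L : Int := (parts.length : Int)
    if sn < fms then
      pvALoop d fms fmi fml rest (tts, L, ts, tt)
    else if sn = fms then
      if fmi + fml + 50 ≤ L then (0, L, sn, fmi + fml + 49)
      else pvALoop d fms fmi fml rest (50 - (L - fmi - fml), L, ts, tt)
    else
      if L ≥ tts then (0, L, sn, tts - 1)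
      else pvALoop d fms fmi fml rest (tts - L, L, ts, tt)

def get_to_info (sentence_num_to_sentence_text : List (Int × String)) (focus_mention_sentence_num : Int) (focus_mention_index_in_sentence : Int) (focus_mention : String) : Int × Int × Int :=
  let d := PySem.Dict.ofList sentence_num_to_sentence_text
  let focus_mention_parts := PySem.Str.split₀ focus_mention
  let sorted_sentence_num_list := PySem.List.sorted (PySem.Dict.keys d) (fun x => x)
  let st := pvALoop d focus_mention_sentence_num focus_mention_index_in_sentence
      (focus_mention_parts.length : Int) sorted_sentence_num_list (50, 0, -1, -1)
  -- sorted_sentence_num_list[len-1]: IndexError on an empty dict (excluded by Pre_)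
  if st.1 ≠ 0 then
    (PySem.List.pyGetD sorted_sentence_num_list ((sorted_sentence_num_list.length : Int) - 1) 0,
     st.2.1 - 1, st.1)
  else (st.2.2.1, st.2.2.2, 0)

-- ===== PORT B =====
-- len(d[k].split())
def pvSenLen (d : PySem.Dict Int String) (k : Int) : Int :=
  ((PySem.Str.split₀ (PySem.Dict.getD d k "")).length : Int)

-- Source B's prefix-building loop: 'acc += c; prefix.append(acc)'
def pvPrefix : List Int → Int → List Int
  | [], _ => []
  | c :: rest, acc => (acc + c) :: pvPrefix rest (acc + c)

-- the tail of Source B after 'needed'/'start' are fixed: prefix sums + bisect_left on them;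
-- keys[start+j] / keys[-1] / lens[-1] / prefix[j-1] / prefix[-1] via pyGetD (in range under Pre_)
def pvBTail (d : PySem.Dict Int String) (keys lens : List Int) (start : Nat) (needed : Int) : Int × Int × Int :=
  let pref := pvPrefix (lens.drop start) 0   -- lens[start:]
  let j := PySem.List.bisectLeft pref needed
  if j < pref.length then
    let prev := if 0 < j then PySem.List.pyGetD pref ((j : Int) - 1) 0 else 0
    (PySem.List.pyGetD keys ((start : Int) + (j : Int)) 0, needed - prev - 1, 0)
  else
    let total := if pref = [] then 0 else PySem.List.pyGetD pref (-1) 0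
    (PySem.List.pyGetD keys (-1) 0, PySem.List.pyGetD lens (-1) 0 - 1, needed - total)

def get_to_info_alt (sentence_num_to_sentence_text : List (Int × String)) (focus_mention_sentence_num : Int) (focus_mention_index_in_sentence : Int) (focus_mention : String) : Int × Int × Int :=
  let d := PySem.Dict.ofList sentence_num_to_sentence_text
  let keys := PySem.List.sorted (PySem.Dict.keys d) (fun x => x)
  let lens := keys.map (fun k => pvSenLen d k)
  let fml : Int := ((PySem.Str.split₀ focus_mention).length : Int)
  let start := PySem.List.bisectRight keys focus_mention_sentence_num
  -- 'if focus_mention_sentence_num in d: sen_len = len(d[focus].split()) …'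
  match PySem.Dict.get? d focus_mention_sentence_num with
  | some txt =>
    let sen_len : Int := ((PySem.Str.split₀ txt).length : Int)
    if focus_mention_index_in_sentence + fml + 50 ≤ sen_len then
      (focus_mention_sentence_num, focus_mention_index_in_sentence + fml + 49, 0)
    else
      pvBTail d keys lens start (50 - (sen_len - focus_mention_index_in_sentence - fml))
  | none => pvBTail d keys lens start 50

-- ===== PRECONDITION & SPEC =====
-- On an empty dict both programs index keys[-1] of an empty list: IndexError. Nothing else raises.
def Pre_get_to_info (sentence_num_to_sentence_text : List (Int × String)) (focus_mention_sentence_num : Int) (focus_mention_index_in_sentence : Int) (focus_mention : String) : Prop :=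
  sentence_num_to_sentence_text ≠ []
instance (sentence_num_to_sentence_text : List (Int × String)) (focus_mention_sentence_num : Int) (focus_mention_index_in_sentence : Int) (focus_mention : String) : Decidable (Pre_get_to_info sentence_num_to_sentence_text focus_mention_sentence_num focus_mention_index_in_sentence focus_mention) := by unfold Pre_get_to_info; infer_instance

def pvWitness_get_to_info : (List (Int × String)) × Int × Int × String :=
  ([(0, "a b c"), (1, "d e")], 0, 1, "b")

def Spec_get_to_info (sentence_num_to_sentence_text : List (Int × String)) (focus_mention_sentence_num : Int) (focus_mention_index_in_sentence : Int) (focus_mention : String) (out : Int × Int × Int) : Prop := out = get_to_info_alt sentence_num_to_sentence_text focus_mention_sentence_num focus_mention_index_in_sentence focus_mention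
instance (sentence_num_to_sentence_text : List (Int × String)) (focus_mention_sentence_num : Int) (focus_mention_index_in_sentence : Int) (focus_mention : String) (out : Int × Int × Int) : Decidable (Spec_get_to_info sentence_num_to_sentence_text focus_mention_sentence_num focus_mention_index_in_sentence focus_mention out) := by unfold Spec_get_to_info; infer_instance

-- ===== CLAIM (what is proved, stated in full; the proofs are below) =====
def Claim_equal_get_to_info : Prop := ∀ (sentence_num_to_sentence_text : List (Int × String)) (focus_mention_sentence_num : Int) (focus_mention_index_in_sentence : Int) (focus_mention : String), Dom_get_to_info sentence_num_to_sentence_text focus_mention_sentence_num focus_mention_index_in_sentence focus_mention → Pre_get_to_info sentence_num_to_sentence_text focus_mention_sentence_num focus_mention_index_in_sentence focus_mention → Spec_get_to_info sentence_num_to_sentence_text focus_mention_sentence_num focus_mention_index_in_sentence focus_mention (get_to_info sentence_num_to_sentence_text focus_mention_sentence_num focus_mention_index_in_sentence focus_mention)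

-- ===== LEMMAS AND PROOFS =====

-- the post-processing after A's loop (the 'if total_token_size != 0' fixup)
def pvPost (S : List Int) (st : Int × Int × Int × Int) : Int × Int × Int :=
  if st.1 ≠ 0 then
    (PySem.List.pyGetD S ((S.length : Int) - 1) 0, st.2.1 - 1, st.1)
  else (st.2.2.1, st.2.2.2, 0)

-- proof-side linear view of B's tail: the scan pvBTail's bisect-on-prefix-sums computes
def pvBScan (d : PySem.Dict Int String) : List Int → Int → (Int × Int × Int) ⊕ Int
  | [], needed => .inr needed
  | k :: rest, needed =>
    let cnt := pvSenLen d k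
    if cnt ≥ needed then .inl (k, needed - 1, 0)
    else pvBScan d rest (needed - cnt)

def pvBFinish (d : PySem.Dict Int String) (keys rest : List Int) (needed : Int) : Int × Int × Int :=
  match pvBScan d rest needed with
  | .inl r => r
  | .inr nd =>
    let last := PySem.List.pyGetD keys (-1) 0
    (last, pvSenLen d last - 1, nd)

theorem pvALoop_skip (d : PySem.Dict Int String) (fms fmi fml : Int)
    (P : List Int) (R : List Int) (tts p ts tt : Int)
    (hP : ∀ k ∈ P, k < fms) :
    pvALoop d fms fmi fml (P ++ R) (tts, p, ts, tt) =
      pvALoop d fms fmi fml R (tts, P.foldl (fun _ k => pvSenLen d k) p, ts, tt) := by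
  induction P generalizing p with
  | nil => rfl
  | cons a P ih =>
    have ha : a < fms := hP a (List.mem_cons_self)
    simp only [List.cons_append, pvALoop, if_pos ha, List.foldl_cons]
    exact ih _ (fun k hk => hP k (List.mem_cons_of_mem _ hk))

theorem pvFoldl_last (f : Int → Int) (l : List Int) (a : Int) (h : l ≠ []) :
    l.foldl (fun _ k => f k) a = f (l.getLast h) := by
  induction l generalizing a with
  | nil => exact absurd rfl h
  | cons x l ih =>
    cases l with
    | nil => rfl
    | cons y l => simpa [List.getLast_cons] using ih (f x) (by simp)

theorem pvMem_keys_update (d : PySem.Dict Int String) (ps : List (Int × String)) (k : Int)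
    (h : k ∈ d.keys) : k ∈ (d.update ps).keys := by
  induction ps generalizing d with
  | nil => simpa [PySem.Dict.update] using h
  | cons p ps ih =>
    show k ∈ ((d.insert p.1 p.2).update ps).keys
    exact ih _ ((PySem.Dict.mem_keys_insert _ _ _ _).2 (Or.inr h))

theorem pvKeys_ofList_ne_nil (l : List (Int × String)) (h : l ≠ []) :
    (PySem.Dict.ofList l).keys ≠ [] := by
  obtain ⟨⟨k, v⟩, t, rfl⟩ := List.exists_cons_of_ne_nil h
  intro hk
  have hmem : k ∈ (PySem.Dict.ofList ((k, v) :: t)).keys := by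
    show k ∈ ((PySem.Dict.empty.insert k v).update t).keys
    exact pvMem_keys_update _ _ _ ((PySem.Dict.mem_keys_insert _ _ _ _).2 (Or.inl rfl))
  simp [hk] at hmem

-- one step of A's loop at the focus sentence
theorem pvALoop_focus (d : PySem.Dict Int String) (fms fmi fml : Int)
    (tl : List Int) (tts p ts tt : Int) :
    pvALoop d fms fmi fml (fms :: tl) (tts, p, ts, tt) =
      if fmi + fml + 50 ≤ pvSenLen d fms then (0, pvSenLen d fms, fms, fmi + fml + 49)
      else pvALoop d fms fmi fml tl (50 - (pvSenLen d fms - fmi - fml), pvSenLen d fms, ts, tt) := by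
  simp [pvALoop, pvSenLen]

-- A's loop over the sentences strictly after the focus, post-processed, is the linear scan view
theorem pvMainFinish (d : PySem.Dict Int String) (fms fmi fml : Int)
    (S : List Int) (hS : S ≠ []) (R : List Int) :
    ∀ (needed p ts tt : Int), 1 ≤ needed → (∀ k ∈ R, fms < k) →
    (R = [] → p = pvSenLen d (S.getLast hS)) →
    (∀ hR : R ≠ [], R.getLast hR = S.getLast hS) →
    pvPost S (pvALoop d fms fmi fml R (needed, p, ts, tt)) = pvBFinish d S R needed := by
  induction R with
  | nil =>
    intro needed p ts tt h1 _ hlast _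
    have hget : PySem.List.pyGetD S ((S.length : Int) - 1) 0 = S.getLast hS := by
      have hlen : 0 < S.length := List.length_pos_iff.2 hS
      rw [PySem.List.pyGetD_eq_getElem S 0 (by omega) (by omega), List.getLast_eq_getElem]
      congr 1
      omega
    simp only [pvALoop, pvBFinish, pvBScan, pvPost]
    rw [if_pos (by omega), PySem.List.pyGetD_neg_one S 0 hS, hget, hlast rfl]
  | cons k tl ih =>
    intro needed p ts tt h1 hR _ hsuf
    have hk : fms < k := hR k List.mem_cons_self
    have hstep : pvALoop d fms fmi fml (k :: tl) (needed, p, ts, tt) =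
        if pvSenLen d k ≥ needed then (0, pvSenLen d k, k, needed - 1)
        else pvALoop d fms fmi fml tl (needed - pvSenLen d k, pvSenLen d k, ts, tt) := by
      simp only [pvALoop, pvSenLen]
      rw [if_neg (by omega), if_neg (by omega)]
    by_cases hc : pvSenLen d k ≥ needed
    · rw [hstep, if_pos hc]
      simp only [pvBFinish, pvBScan, if_pos hc, pvPost]
      simp
    · rw [hstep, if_neg hc]
      have hBstep : pvBFinish d S (k :: tl) needed = pvBFinish d S tl (needed - pvSenLen d k) := by
        simp only [pvBFinish, pvBScan, if_neg hc]
      rw [hBstep]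
      refine ih (needed - pvSenLen d k) (pvSenLen d k) ts tt (by omega)
        (fun x hx => hR x (List.mem_cons_of_mem _ hx)) ?_ ?_
      · intro htl
        subst htl
        have hk' : k = S.getLast hS := by simpa using hsuf (by simp)
        rw [← hk']
      · intro htl
        have := hsuf (by simp)
        rwa [List.getLast_cons htl] at this

-- pvPrefix bookkeeping
theorem pvPrefix_length (L : List Int) (a : Int) : (pvPrefix L a).length = L.length := by
  induction L generalizing a with
  | nil => rfl
  | cons c L ih => simp [pvPrefix, ih]

theorem pvPrefix_getElem (L : List Int) (a : Int) (i : Nat) (hi : i < (pvPrefix L a).length) :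
    (pvPrefix L a)[i] = a + (L.take (i + 1)).sum := by
  induction L generalizing a i with
  | nil => simp [pvPrefix] at hi
  | cons c L ih =>
    cases i with
    | zero => simp [pvPrefix]
    | succ i =>
      have hi' : i < (pvPrefix L (a + c)).length := by
        simpa [pvPrefix] using hi
      show (pvPrefix L (a + c))[i] = a + ((c :: L).take (i + 1 + 1)).sum
      rw [ih (a + c) i hi']
      simp only [List.take_succ_cons, List.sum_cons]
      ring

-- monotone prefix sums of a nonnegative list
theorem pvTakeSum_mono (L : List Int) (hnn : ∀ x ∈ L, 0 ≤ x) (m n : Nat) (h : m ≤ n) :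
    (L.take m).sum ≤ (L.take n).sum := by
  have hsplit : L.take n = L.take m ++ (L.drop m).take (n - m) := by
    rw [← List.take_add]
    congr 1
    omega
  rw [hsplit, List.sum_append]
  have : 0 ≤ ((L.drop m).take (n - m)).sum :=
    List.sum_nonneg (fun x hx => hnn x (List.mem_of_mem_drop (List.mem_of_mem_take hx)))
  omega

-- the linear scan characterised by prefix sums: the first j whose cumulative count reaches
-- 'needed' wins with token index needed - (sum before j) - 1; no such j leaves the remainder
theorem pvScan_char (d : PySem.Dict Int String) :
    ∀ (R : List Int) (needed : Int) (j : Nat),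
    (∀ i : Nat, i < R.length → i < j → ((R.map (pvSenLen d)).take (i + 1)).sum < needed) →
    (∀ i : Nat, i < R.length → j ≤ i → needed ≤ ((R.map (pvSenLen d)).take (i + 1)).sum) →
    pvBScan d R needed =
      if h : j < R.length then
        Sum.inl (R[j], needed - ((R.map (pvSenLen d)).take j).sum - 1, 0)
      else Sum.inr (needed - (R.map (pvSenLen d)).sum) := by
  intro R
  induction R with
  | nil => intro needed j _ _; simp [pvBScan]
  | cons k rest ih =>
    intro needed j h1 h2
    by_cases hc : pvSenLen d k ≥ needed
    · have hj0 : j = 0 := by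
        by_contra hj
        have := h1 0 (by simp) (by omega)
        simp at this
        omega
      subst hj0
      rw [dif_pos (by simp)]
      simp [pvBScan, if_pos hc]
    · have hj1 : 1 ≤ j := by
        by_contra hj
        have := h2 0 (by simp) (by omega)
        simp at this
        omega
      have hstep : pvBScan d (k :: rest) needed = pvBScan d rest (needed - pvSenLen d k) := by
        simp only [pvBScan, if_neg hc]
      rw [hstep, ih (needed - pvSenLen d k) (j - 1) ?_ ?_]
      · by_cases hlt : j - 1 < rest.length
        · rw [dif_pos hlt, dif_pos (by simp; omega)]
          have hget : (k :: rest)[j]'(by simp; omega) = rest[j - 1]'hlt := by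
            rw [List.getElem_cons, dif_neg (by omega : ¬ j = 0)]
          rw [hget]
          have hsum : ((k :: rest).map (pvSenLen d)).take j =
              pvSenLen d k :: (rest.map (pvSenLen d)).take (j - 1) := by
            have : j = (j - 1) + 1 := by omega
            rw [this]
            simp [List.take_succ_cons]
          rw [hsum]
          simp only [List.sum_cons]
          have harith : needed - (pvSenLen d k + ((rest.map (pvSenLen d)).take (j - 1)).sum) - 1 =
              needed - pvSenLen d k - ((rest.map (pvSenLen d)).take (j - 1)).sum - 1 := by ring
          rw [harith]
        · rw [dif_neg hlt, dif_neg (by simp; omega)]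
          simp only [List.map_cons, List.sum_cons]
          congr 1
          ring
      · intro i hi hij
        have := h1 (i + 1) (by simp; omega) (by omega)
        simpa [List.take_succ_cons, List.sum_cons] using by
          simp only [List.map_cons, List.take_succ_cons, List.sum_cons] at this
          omega
      · intro i hi hij
        have := h2 (i + 1) (by simp; omega) (by omega)
        simp only [List.map_cons, List.take_succ_cons, List.sum_cons] at this
        omega

-- B's prefix-sum + bisect tail equals the linear scan view, for lens = map senLen keys
theorem pvBTail_eq (d : PySem.Dict Int String) (keys : List Int) (start : Nat) (needed : Int)
    (hne : keys ≠ []) :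
    pvBTail d keys (keys.map (pvSenLen d)) start needed =
      pvBFinish d keys (keys.drop start) needed := by
  have hLR : (keys.map (pvSenLen d)).drop start = (keys.drop start).map (pvSenLen d) :=
    (List.map_drop).symm
  set R := keys.drop start with hRdef
  set L := R.map (pvSenLen d) with hLdef
  have hnn : ∀ x ∈ L, 0 ≤ x := by
    intro x hx
    obtain ⟨k, _, rfl⟩ := List.mem_map.1 hx
    exact Int.natCast_nonneg _
  have hprlen : (pvPrefix L 0).length = R.length := by
    rw [pvPrefix_length]; simp [hLdef]
  have hpw : (pvPrefix L 0).Pairwise (fun a b => a ≤ b) := by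
    rw [List.pairwise_iff_getElem]
    intro i j hi hj hij
    rw [pvPrefix_getElem, pvPrefix_getElem]
    have := pvTakeSum_mono L hnn (i + 1) (j + 1) (by omega)
    omega
  simp only [pvBTail, hLR]
  obtain ⟨hj1, hj2, hj3⟩ := PySem.List.bisectLeft_spec (pvPrefix L 0) needed hpw
  set j := PySem.List.bisectLeft (pvPrefix L 0) needed with hjdef
  have hscan := pvScan_char d R needed j
    (fun i hi hij => by
      have := hj2 i (by omega) hij
      rwa [pvPrefix_getElem, zero_add] at this)
    (fun i hi hij => by
      have := hj3 i (by omega) hij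
      rwa [pvPrefix_getElem, zero_add] at this)
  by_cases hlt : j < R.length
  · -- found: B returns keys[start+j] with token needed - prefix-before - 1
    rw [pvBFinish, hscan, dif_pos hlt]
    simp only
    rw [if_pos (by rw [hprlen]; exact hlt)]
    have hkeyslen : start + j < keys.length := by
      have : R.length = keys.length - start := by simp [hRdef]
      omega
    have hkey : PySem.List.pyGetD keys ((start : Int) + (j : Int)) 0 = R[j] := by
      rw [show ((start : Int) + (j : Int)) = ((start + j : Nat) : Int) by push_cast; ring,
        PySem.List.pyGetD_natCast, List.getD_eq_getElem _ _ hkeyslen]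
      simp only [hRdef, List.getElem_drop]
    rw [hkey]
    congr 2
    by_cases hj0 : 0 < j
    · rw [if_pos hj0]
      rw [show ((j : Int) - 1) = ((j - 1 : Nat) : Int) by omega, PySem.List.pyGetD_natCast,
        List.getD_eq_getElem _ _ (by omega : j - 1 < (pvPrefix L 0).length),
        pvPrefix_getElem, zero_add]
      rw [show j - 1 + 1 = j from by omega, hLdef]
    · rw [if_neg hj0]
      have : j = 0 := by omega
      simp [this]
  · -- not found: the padding fallback on the last sentence
    rw [pvBFinish, hscan, dif_neg hlt]
    simp only
    rw [if_neg (by rw [hprlen]; exact hlt)]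
    have hlast : PySem.List.pyGetD (keys.map (pvSenLen d)) (-1) 0 =
        pvSenLen d (keys.getLast hne) := by
      rw [PySem.List.pyGetD_neg_one _ 0 (by simpa using hne)]
      exact List.getLast_map _
    have hlastk : PySem.List.pyGetD keys (-1) (0 : Int) = keys.getLast hne :=
      PySem.List.pyGetD_neg_one keys 0 hne
    have htotal : (if pvPrefix L 0 = [] then 0 else PySem.List.pyGetD (pvPrefix L 0) (-1) 0) =
        L.sum := by
      by_cases hL : L = []
      · simp [hL, pvPrefix]
      · have hpne : pvPrefix L 0 ≠ [] := by
          intro h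
          have := pvPrefix_length L 0
          rw [h] at this
          exact hL (List.eq_nil_of_length_eq_zero this.symm)
        rw [if_neg hpne, PySem.List.pyGetD_neg_one _ 0 hpne, List.getLast_eq_getElem,
          pvPrefix_getElem, zero_add]
        have hlen : (pvPrefix L 0).length = L.length := pvPrefix_length L 0
        rw [List.take_of_length_le (by omega)]
    rw [hlast, hlastk, htotal]

-- sorted nodup: bisectRight's drop agrees with bisectLeft's (minus the focus element if present)
theorem pvBisect_drop (S : List Int) (x : Int)
    (hle : S.Pairwise (fun a b => a ≤ b)) (hnd : S.Nodup) :
    (x ∉ S → PySem.List.bisectRight S x = PySem.List.bisectLeft S x) ∧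
    (∀ (i : Nat) (hi : i < S.length), i = PySem.List.bisectLeft S x → S[i] = x →
      PySem.List.bisectRight S x = i + 1) := by
  obtain ⟨hl1, hl2, hl3⟩ := PySem.List.bisectLeft_spec S x hle
  obtain ⟨hr1, hr2, hr3⟩ := PySem.List.bisectRight_spec S x hle
  set i := PySem.List.bisectLeft S x
  set r := PySem.List.bisectRight S x
  have hir : i ≤ r := by
    by_contra h
    have hr : r < S.length := by omega
    have := hl2 r hr (by omega)
    have := hr3 r hr (by omega)
    omega
  constructor
  · intro hx
    by_contra h
    have hi : i < S.length := by omega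
    have h1 := hl3 i hi (by omega)
    have h2 := hr2 i hi (by omega)
    exact hx (by
      have : S[i] = x := by omega
      exact this ▸ List.getElem_mem hi)
  · intro k hk hki hkx
    subst hki
    have hge : i + 1 ≤ r := by
      by_contra h
      have := hr3 i hk (by omega)
      omega
    by_contra h
    have hi1 : i + 1 < S.length := by omega
    have h1 := hr2 (i + 1) hi1 (by omega)
    have h2 : S[i] < S[i + 1] := by
      have hle' := (List.pairwise_iff_getElem).1 hle i (i + 1) hk hi1 (by omega)
      have hne : S[i] ≠ S[i + 1] := by
        intro he
        have := (List.Nodup.getElem_inj_iff hnd).1 he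
        omega
      omega
    omega

-- ===== VERDICT (by name: the statement is the Claim_ definition above) =====
theorem get_to_info_spec : Claim_equal_get_to_info := by
  intro l fms fmi fm _dom hpre
  simp only [Spec_get_to_info, get_to_info, get_to_info_alt]
  set d := PySem.Dict.ofList l with hd
  set S := PySem.List.sorted (PySem.Dict.keys d) (fun x => x) with hSdef
  set fml := ((PySem.Str.split₀ fm).length : Int) with hfml
  have hkeys : (PySem.Dict.keys d).Nodup := PySem.Dict.nodup_keys_ofList l
  have hS : S ≠ [] := by
    rw [hSdef, Ne, PySem.List.sorted_eq_nil_iff]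
    exact pvKeys_ofList_ne_nil l hpre
  have hle : S.Pairwise (fun a b => a ≤ b) := by
    simpa using PySem.List.sorted_pairwise (PySem.Dict.keys d) (fun x => x)
  have hnd : S.Nodup := (PySem.List.sorted_perm (PySem.Dict.keys d) (fun x => x) false).symm.nodup hkeys
  obtain ⟨hilen, hbefore, hafter⟩ := PySem.List.bisectLeft_spec S fms hle
  obtain ⟨habsent, hpresent⟩ := pvBisect_drop S fms hle hnd
  set i := PySem.List.bisectLeft S fms with hidef
  set r := PySem.List.bisectRight S fms with hrdef
  have hmemS : ∀ x : Int, x ∈ S ↔ x ∈ PySem.Dict.keys d := fun x =>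
    (PySem.List.sorted_perm (PySem.Dict.keys d) (fun x => x) false).mem_iff
  have hmemget : ∀ x : Int, (x ∈ S ↔ PySem.Dict.get? d x ≠ none) := by
    intro x
    constructor
    · intro hx h
      exact ((PySem.Dict.get?_eq_none_iff_not_mem_keys d x).1 h) ((hmemS x).1 hx)
    · intro h
      by_contra hx
      exact h ((PySem.Dict.get?_eq_none_iff_not_mem_keys d x).2 (fun hm => hx ((hmemS x).2 hm)))
  have hA : (let st := pvALoop d fms fmi fml S (50, 0, -1, -1);
      if st.1 ≠ 0 then
        (PySem.List.pyGetD S ((S.length : Int) - 1) 0, st.2.1 - 1, st.1)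
      else (st.2.2.1, st.2.2.2, 0)) = pvPost S (pvALoop d fms fmi fml S (50, 0, -1, -1)) := rfl
  rw [hA]
  have hskip : pvALoop d fms fmi fml S (50, 0, -1, -1) =
      pvALoop d fms fmi fml (S.drop i) (50, (S.take i).foldl (fun _ k => pvSenLen d k) 0, -1, -1) := by
    conv_lhs => rw [← List.take_append_drop i S]
    refine pvALoop_skip d fms fmi fml (S.take i) (S.drop i) 50 0 (-1) (-1) ?_
    intro k hk
    obtain ⟨j, hj, hjk⟩ := List.getElem_of_mem hk
    have hj' : j < i ∧ j < S.length := by simpa using hj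
    rw [List.getElem_take] at hjk
    exact hjk ▸ hbefore j hj'.2 hj'.1
  rw [hskip]
  cases hdropeq : S.drop i with
  | nil =>
    have hilen' : S.length ≤ i := by
      have := List.drop_eq_nil_iff.1 hdropeq
      omega
    have htakeall : S.take i = S := List.take_of_length_le hilen'
    have hnot : fms ∉ S := by
      intro hx
      obtain ⟨j, hj, hjk⟩ := List.getElem_of_mem hx
      have := hbefore j hj (by omega)
      omega
    have hget : PySem.Dict.get? d fms = none := by
      by_contra h
      exact hnot ((hmemget fms).2 h)
    rw [hget]
    have hreq : r = i := habsent hnot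
    show pvPost S (pvALoop d fms fmi fml [] _) = pvBTail d S (S.map (pvSenLen d)) r 50
    rw [pvBTail_eq d S r 50 hS, hreq, hdropeq]
    refine pvMainFinish d fms fmi fml S hS [] 50 _ (-1) (-1) (by norm_num) (by simp) ?_ (by simp)
    intro _
    rw [htakeall, pvFoldl_last (pvSenLen d) S 0 hS]
  | cons k tl =>
    have hilen2 : i < S.length := by
      by_contra h
      rw [List.drop_eq_nil_iff.2 (by omega)] at hdropeq
      exact absurd hdropeq (by simp)
    have hSik : S[i] = k := by
      have := List.drop_eq_getElem_cons hilen2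
      rw [hdropeq] at this
      exact (List.cons.injEq _ _ _ _ ▸ this.symm).1
    have hSsplit : S = S.take i ++ (k :: tl) := by rw [← hdropeq, List.take_append_drop]
    have hklast : S.getLast hS = (k :: tl).getLast (by simp) := by
      have h2 : ∀ (h : S ≠ []), S.getLast h = (k :: tl).getLast (by simp) := by
        rw [hSsplit]
        intro h
        rw [List.getLast_append (by simp)]
        simp
      exact h2 hS
    have hkge : fms ≤ k := by
      have := hafter i hilen2 (by omega)
      omega
    have htlgt : ∀ x ∈ tl, fms < x := by
      intro x hx
      have hpw : (k :: tl).Pairwise (fun a b => a ≤ b) := by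
        rw [← hdropeq]
        exact hle.drop
      have hnd' : (k :: tl).Nodup := by
        rw [← hdropeq]
        exact hnd.drop
      have h1 : k ≤ x := (List.pairwise_cons.1 hpw).1 x hx
      have h2 : k ≠ x := by
        intro h
        exact (List.nodup_cons.1 hnd').1 (h ▸ hx)
      omega
    by_cases hkf : k = fms
    · -- focus sentence present: B takes the dict branch, then bisect_right starts after it
      subst hkf
      have hmem : k ∈ S := hSik ▸ List.getElem_mem hilen2
      obtain ⟨txt, htxt⟩ : ∃ txt, PySem.Dict.get? d k = some txt := by
        cases h : PySem.Dict.get? d k with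
        | none => exact absurd h ((hmemget k).1 hmem)
        | some txt => exact ⟨txt, rfl⟩
      rw [htxt]
      have hsen : ((PySem.Str.split₀ txt).length : Int) = pvSenLen d k := by
        rw [pvSenLen, PySem.Dict.getD_of_get?_eq_some d "" htxt]
      have hreq : r = i + 1 := hpresent i hilen2 rfl hSik
      have hdropr : S.drop r = tl := by
        rw [hreq, ← List.drop_drop, hdropeq]
        simp
      rw [pvALoop_focus]
      simp only [hsen]
      by_cases henough : fmi + fml + 50 ≤ pvSenLen d k
      · rw [if_pos henough, if_pos henough]
        simp [pvPost]
      · rw [if_neg henough, if_neg henough]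
        rw [pvBTail_eq d S r _ hS, hdropr]
        refine pvMainFinish d k fmi fml S hS tl _ _ (-1) (-1) (by omega) htlgt ?_ ?_
        · intro htl
          subst htl
          have hk' : k = S.getLast hS := by simpa using hklast.symm
          rw [← hk']
        · intro htl
          rw [hklast, List.getLast_cons htl]
    · -- focus sentence absent: B takes the 'needed = 50' branch from the same position
      have hkgt : fms < k := lt_of_le_of_ne hkge (fun h => hkf h.symm)
      have hnot : fms ∉ S := by
        intro hx
        obtain ⟨j, hj, hjx⟩ := List.getElem_of_mem hx
        by_cases hji : j < i
        · have := hbefore j hj hji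
          omega
        · have hij : i ≤ j := by omega
          have hle' : k ≤ S[j] := by
            rcases Nat.eq_or_lt_of_le hij with he | hlt
            · have hji2 : S[j]'hj = S[i]'hilen2 := by
                congr 1
                omega
              rw [hji2, hSik]
            · have := (List.pairwise_iff_getElem).1 hle i j hilen2 hj hlt
              rw [hSik] at this
              omega
          omega
      have hget : PySem.Dict.get? d fms = none := by
        by_contra h
        exact hnot ((hmemget fms).2 h)
      rw [hget]
      have hreq : r = i := habsent hnot
      rw [pvBTail_eq d S r 50 hS, hreq, hdropeq]
      refine pvMainFinish d fms fmi fml S hS (k :: tl) 50 _ (-1) (-1) (by norm_num)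
        ?_ (by simp) ?_
      · intro x hx
        rcases List.mem_cons.1 hx with rfl | hx
        · exact hkgt
        · exact htlgt x hx
      · intro _
        exact hklast.symm
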